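-- pv_equiv track=rewrite | github.com/JohnStokes228/minimum_prime_hit_set | shared_functions.py | get_remaining
-- ===== SOURCE A (Python) =====
-- def get_remaining(
--     prime_decomposition_list,
--     sols,
-- ):
--     """Get list of all sub lists that are not included in the solution directly.
--
--     steps included:
--     1. get all decompositions not included in sols.
--     2. remove all remaining decompositions that are subsets of other decompositions i.e. [2, 3], [3, 2, 7] -> [3, 2, 7]
--
--     Parameters
--     ----------
--     prime_decomposition_list : list
--         List of lists of prime numbers
--     sols : list
--         List of integers which if present as a list in prime_decomposition_list should be dropped.
--
--     Returns
--     -------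
--     list
--         List of lists where each sublist if of length > 1.
--     """
--     sols = [[i] for i in sols]
--
--     remaining = [decomposition for decomposition in prime_decomposition_list
--                  if decomposition not in sols]
--     remaining_sets = [set(decomposition) for decomposition in remaining]
--
--     remaining = [decomposition_list for decomposition_list, decomposition_set in zip(remaining, remaining_sets)
--                  if not any(decomposition_set < other for other in remaining_sets)]
--
--     return remaining
-- ===== SOURCE B (Python) =====
-- def get_remaining(
--     prime_decomposition_list,
--     sols,
-- ):
--     """Drop sols singletons, then keep only set-maximal decompositions via a
--     size-descending sweep against kept maximal sets, restoring input order."""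
--     sols_set = set(sols)
--     remaining = [d for d in prime_decomposition_list
--                  if len(d) != 1 or d[0] not in sols_set]
--     sets = [set(d) for d in remaining]
--
--     order = sorted(enumerate(sets), key=lambda p: -len(p[1]))
--     kept_sets = []
--     keep_idx = []
--     for i, s in order:
--         if not any(s < t for t in kept_sets):
--             keep_idx.append(i)
--             kept_sets.append(s)
--
--     return [d for i, d in enumerate(remaining) if i in keep_idx]
-- ===== Notes on version B (the rewrite author's own statement) =====
-- stated objective: faster
-- what changed: B replaces A's all-pairs proper-subset scan (each set tested against every other set) with a size-descending sweep that tests each set only against the maximal sets kept so far, reordering survivors back to input order; the sols filter becomes a set-membership test on singletons.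
import Mathlib
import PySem

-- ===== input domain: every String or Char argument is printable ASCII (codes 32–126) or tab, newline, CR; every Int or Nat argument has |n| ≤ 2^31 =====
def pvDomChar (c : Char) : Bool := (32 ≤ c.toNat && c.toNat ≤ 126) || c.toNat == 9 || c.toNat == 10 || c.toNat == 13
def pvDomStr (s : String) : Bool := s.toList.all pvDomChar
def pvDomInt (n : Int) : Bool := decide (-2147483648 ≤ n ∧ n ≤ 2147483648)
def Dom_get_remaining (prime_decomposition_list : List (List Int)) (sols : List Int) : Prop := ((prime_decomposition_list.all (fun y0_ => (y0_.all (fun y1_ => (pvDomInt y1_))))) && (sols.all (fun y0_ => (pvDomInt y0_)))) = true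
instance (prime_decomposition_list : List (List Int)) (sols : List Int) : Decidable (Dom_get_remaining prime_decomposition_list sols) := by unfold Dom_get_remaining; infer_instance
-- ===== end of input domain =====

-- B replaces A's all-pairs proper-subset scan with a size-descending sweep that tests each
-- decomposition's set only against the maximal sets kept so far (objective: faster; measured).

-- Python's `s < t` on sets: proper subset (used by both sources via the operator)
def pyProperSubset (s t : PySem.Set Int) : Bool :=
  PySem.Set.issubset s t && !(PySem.Set.equal s t)

-- ===== PORT A =====
def get_remaining (prime_decomposition_list : List (List Int)) (sols : List Int) : List (List Int) :=
  let sols' := sols.map (fun i => ([i] : List Int))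
  let remaining := prime_decomposition_list.filter (fun d => !(sols'.contains d))
  let remaining_sets := remaining.map (fun d => (PySem.Set.ofList d : PySem.Set Int))
  ((remaining.zip remaining_sets).filter
      (fun p => !(remaining_sets.any (fun other => pyProperSubset p.2 other)))).map Prod.fst

-- ===== PORT B =====
def get_remaining_alt (prime_decomposition_list : List (List Int)) (sols : List Int) : List (List Int) :=
  let sols_set : PySem.Set Int := PySem.Set.ofList sols
  let remaining := prime_decomposition_list.filter (fun d =>
      match d with
      | [x] => !(PySem.Set.contains sols_set x)
      | _ => true)
  let sets := remaining.map (fun d => (PySem.Set.ofList d : PySem.Set Int))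
  let order := PySem.List.sorted (PySem.List.enumerate sets) (fun p => -(PySem.Set.len p.2))
  let fin := order.foldl
      (fun (st : List (PySem.Set Int) × List Int) p =>
        if !(st.1.any (fun t => pyProperSubset p.2 t)) then (st.1 ++ [p.2], st.2 ++ [p.1])
        else st)
      ([], [])
  ((PySem.List.enumerate remaining).filter (fun p => fin.2.contains p.1)).map Prod.snd

-- ===== PRECONDITION & SPEC =====
def Spec_get_remaining (prime_decomposition_list : List (List Int)) (sols : List Int) (out : List (List Int)) : Prop := out = get_remaining_alt prime_decomposition_list sols
instance (prime_decomposition_list : List (List Int)) (sols : List Int) (out : List (List Int)) : Decidable (Spec_get_remaining prime_decomposition_list sols out) := by unfold Spec_get_remaining; infer_instance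

-- ===== CLAIM (what is proved, stated in full; the proofs are below) =====
def Claim_equal_get_remaining : Prop := ∀ (prime_decomposition_list : List (List Int)) (sols : List Int), Dom_get_remaining prime_decomposition_list sols → Spec_get_remaining prime_decomposition_list sols (get_remaining prime_decomposition_list sols)

-- ===== LEMMAS AND PROOFS =====

-- "s is a proper subset of t" as a proposition on element lists
def pss (s t : List Int) : Prop := (∀ x ∈ s, x ∈ t) ∧ ¬(∀ x, x ∈ s ↔ x ∈ t)

-- the global drop test both programs decide: s has a strict superset among `sets`
def Pg (sets : List (List Int)) (s : List Int) : Bool := sets.any (fun t => pyProperSubset s t)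

lemma pyProperSubset_iff (s t : List Int) : pyProperSubset s t = true ↔ pss s t := by
  unfold pyProperSubset pss
  rw [Bool.and_eq_true, PySem.Set.issubset_iff, Bool.not_eq_true']
  refine and_congr_right (fun _ => ?_)
  rw [← Bool.not_eq_true (PySem.Set.equal s t), not_iff_not, PySem.Set.equal_iff]

lemma Pg_iff (sets : List (List Int)) (s : List Int) :
    Pg sets s = true ↔ ∃ t ∈ sets, pss s t := by
  simp [Pg, List.any_eq_true, pyProperSubset_iff]

lemma length_lt_of_pss {s t : List Int} (hs : s.Nodup) (ht : t.Nodup) (h : pss s t) :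
    s.length < t.length := by
  have hsub : s.toFinset ⊆ t.toFinset := by
    intro x hx
    simp only [List.mem_toFinset] at hx ⊢
    exact h.1 x hx
  have hne : s.toFinset ≠ t.toFinset := by
    intro he
    exact h.2 (fun x => by
      constructor
      · intro hx; have := hsub (List.mem_toFinset.2 hx); exact List.mem_toFinset.1 this
      · intro hx
        have : x ∈ t.toFinset := List.mem_toFinset.2 hx
        rw [← he] at this
        exact List.mem_toFinset.1 this)
  have := Finset.card_lt_card (ssubset_of_subset_of_ne hsub hne)
  rwa [List.toFinset_card_of_nodup hs, List.toFinset_card_of_nodup ht] at this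

lemma exists_maximal (L : List (List Int)) (hN : ∀ u ∈ L, u.Nodup) (t : List Int)
    (htL : t ∈ L) :
    ∃ M ∈ L, (∀ x ∈ t, x ∈ M) ∧ ∀ u ∈ L, ¬ pss M u := by
  classical
  set L' := L.filter (fun u => decide (∀ x ∈ t, x ∈ u)) with hL'
  have htL' : t ∈ L' := by simp [hL', htL]
  obtain ⟨M, hM⟩ : ∃ M, List.argmax List.length L' = some M := by
    cases h : List.argmax List.length L' with
    | none => exact absurd (List.argmax_eq_none.1 h ▸ htL') (List.not_mem_nil)
    | some M => exact ⟨M, rfl⟩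
  have hML' : M ∈ L' := List.argmax_mem hM
  have hML : M ∈ L ∧ (∀ x ∈ t, x ∈ M) := by
    have := List.mem_filter.1 hML'
    exact ⟨this.1, by simpa using this.2⟩
  refine ⟨M, hML.1, hML.2, ?_⟩
  intro u hu hpss
  have huL' : u ∈ L' := by
    refine List.mem_filter.2 ⟨hu, ?_⟩
    simp only [decide_eq_true_eq]
    intro x hx
    exact hpss.1 x (hML.2 x hx)
  have hle := List.le_of_mem_argmax huL' hM
  have hlt := length_lt_of_pss (hN M hML.1) (hN u hu) hpss
  omega

-- the two sols-filters agree pointwise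
lemma pred_eq (sols : List Int) (d : List Int) :
    (!((sols.map (fun i => ([i] : List Int))).contains d)) =
    (match d with
     | [x] => !(PySem.Set.contains (PySem.Set.ofList sols) x)
     | _ => true) := by
  match d with
  | [] => simp
  | [x] =>
    have h : ((sols.map (fun i => ([i] : List Int))).contains [x])
        = (PySem.Set.contains (PySem.Set.ofList sols) x) := by
      apply Bool.eq_iff_iff.2
      rw [List.contains_iff_mem, PySem.Set.contains_iff, PySem.Set.mem_ofList]
      constructor
      · intro hm
        obtain ⟨i, hi, he⟩ := List.mem_map.1 hm
        obtain rfl : i = x := by simpa using he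
        exact hi
      · intro hx
        exact List.mem_map.2 ⟨x, hx, rfl⟩
    simp only [h]
  | x :: y :: t => simp

-- enumerate basics
lemma enum_map {α β : Type} (f : α → β) (xs : List α) (s : Int) :
    PySem.List.enumerate (xs.map f) s = (PySem.List.enumerate xs s).map (fun p => (p.1, f p.2)) := by
  induction xs generalizing s with
  | nil => simp [PySem.List.enumerate]
  | cons x t ih => simp [PySem.List.enumerate, ih]

lemma enum_snd {α : Type} (xs : List α) (s : Int) :
    (PySem.List.enumerate xs s).map Prod.snd = xs := by
  induction xs generalizing s with
  | nil => simp [PySem.List.enumerate]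
  | cons x t ih => simp [PySem.List.enumerate, ih]

lemma enum_ge {α : Type} (xs : List α) (s : Int) :
    ∀ p ∈ PySem.List.enumerate xs s, s ≤ p.1 := by
  induction xs generalizing s with
  | nil => simp [PySem.List.enumerate]
  | cons x t ih =>
    intro p hp
    simp only [PySem.List.enumerate, List.mem_cons] at hp
    rcases hp with rfl | hp
    · simp
    · have := ih (s + 1) p hp; omega

lemma enum_inj {α : Type} (xs : List α) (s : Int) {i : Int} {a b : α}
    (ha : (i, a) ∈ PySem.List.enumerate xs s) (hb : (i, b) ∈ PySem.List.enumerate xs s) :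
    a = b := by
  induction xs generalizing s with
  | nil => simp [PySem.List.enumerate] at ha
  | cons x t ih =>
    simp only [PySem.List.enumerate, List.mem_cons, Prod.mk.injEq] at ha hb
    rcases ha with ⟨hi, hax⟩ | ha
    · rcases hb with ⟨-, hbx⟩ | hb
      · rw [hax, hbx]
      · exfalso
        have h2 := enum_ge t (s + 1) (i, b) hb
        simp only at h2
        omega
    · rcases hb with ⟨hi, hbx⟩ | hb
      · exfalso
        have h2 := enum_ge t (s + 1) (i, a) ha
        simp only at h2
        omega
      · exact ih (s + 1) ha hb

lemma enum_filter_snd {α : Type} (h : α → Bool) (xs : List α) (s : Int) :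
    ((PySem.List.enumerate xs s).filter (fun p => h p.2)).map Prod.snd = xs.filter h := by
  induction xs generalizing s with
  | nil => simp [PySem.List.enumerate]
  | cons x t ih =>
    simp only [PySem.List.enumerate, List.filter_cons]
    by_cases hx : h x = true
    · simp [hx, ih]
    · simp only [Bool.not_eq_true] at hx
      simp [hx, ih]

-- the sweep only ever compares against kept sets, yet decides the global test
lemma kept_any_eq (sets : List (List Int)) (hN : ∀ u ∈ sets, u.Nodup)
    (o : List (Int × List Int)) (ho : o.Perm (PySem.List.enumerate sets 0))
    (hpair : o.Pairwise (fun p q => q.2.length ≤ p.2.length))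
    (pre : List (Int × List Int)) (p : Int × List Int) (suf : List (Int × List Int))
    (heq : o = pre ++ p :: suf) :
    (((pre.filter (fun q => !(Pg sets q.2))).map Prod.snd).any
        (fun t => pyProperSubset p.2 t)) = Pg sets p.2 := by
  have hmem_sets : ∀ q ∈ o, q.2 ∈ sets := by
    intro q hq
    have : q.2 ∈ (PySem.List.enumerate sets 0).map Prod.snd :=
      List.mem_map.2 ⟨q, ho.subset hq, rfl⟩
    rwa [enum_snd] at this
  apply Bool.eq_iff_iff.2
  simp only [List.any_eq_true, pyProperSubset_iff, List.mem_map, List.mem_filter]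
  constructor
  · rintro ⟨t, ⟨q, ⟨hqpre, -⟩, rfl⟩, hps⟩
    refine (Pg_iff sets p.2).2 ⟨q.2, hmem_sets q (heq ▸ List.mem_append_left _ hqpre), hps⟩
  · intro hPg
    obtain ⟨t, htm, hst⟩ := (Pg_iff sets p.2).1 hPg
    obtain ⟨M, hML, htM, hMmax⟩ := exists_maximal sets hN t htm
    have hs_mem : p.2 ∈ sets := hmem_sets p (heq ▸ List.mem_append_right _ (List.mem_cons_self))
    have hpsM : pss p.2 M := by
      refine ⟨fun x hx => htM x (hst.1 x hx), ?_⟩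
      intro hiff
      exact hst.2 (fun x => ⟨fun hx => hst.1 x hx, fun hx => (hiff x).2 (htM x hx)⟩)
    have hlen : p.2.length < M.length :=
      length_lt_of_pss (hN _ hs_mem) (hN _ hML) hpsM
    -- M occurs as a pair in o
    obtain ⟨q, hq, hq2⟩ : ∃ q ∈ PySem.List.enumerate sets 0, q.2 = M := by
      have : M ∈ (PySem.List.enumerate sets 0).map Prod.snd := by rw [enum_snd]; exact hML
      obtain ⟨q, hq, hq2⟩ := List.mem_map.1 this
      exact ⟨q, hq, hq2⟩
    have hqo : q ∈ o := ho.mem_iff.2 hq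
    rw [heq] at hqo
    rcases List.mem_append.1 hqo with hqpre | hqtail
    · -- M is kept: it passed the global test
      have hPgM : Pg sets M = false := by
        rw [Bool.eq_false_iff]
        intro hM
        obtain ⟨u, hu, hMu⟩ := (Pg_iff sets M).1 hM
        exact hMmax u hu hMu
      refine ⟨M, ⟨q, ⟨hqpre, by rw [hq2, hPgM]; rfl⟩, hq2⟩, hpsM⟩
    · -- impossible: a strictly larger set cannot come at or after p
      exfalso
      rw [heq] at hpair
      have hpair2 := (List.pairwise_append.1 hpair).2.1
      rcases List.mem_cons.1 hqtail with rfl | hqsuf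
      · rw [hq2] at hlen; omega
      · have := (List.pairwise_cons.1 hpair2).1 q hqsuf
        rw [hq2] at this; omega

-- the fold invariant: processed prefix contributes exactly its globally-maximal pairs
lemma sweep (sets : List (List Int)) (hN : ∀ u ∈ sets, u.Nodup)
    (o : List (Int × List Int)) (ho : o.Perm (PySem.List.enumerate sets 0))
    (hpair : o.Pairwise (fun p q => q.2.length ≤ p.2.length)) :
    ∀ (suf pre : List (Int × List Int)), o = pre ++ suf →
    suf.foldl
        (fun (st : List (PySem.Set Int) × List Int) p =>
          if !(st.1.any (fun t => pyProperSubset p.2 t)) then (st.1 ++ [p.2], st.2 ++ [p.1])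
          else st)
        ((pre.filter (fun q => !(Pg sets q.2))).map Prod.snd,
         (pre.filter (fun q => !(Pg sets q.2))).map Prod.fst)
      = ((o.filter (fun q => !(Pg sets q.2))).map Prod.snd,
         (o.filter (fun q => !(Pg sets q.2))).map Prod.fst) := by
  intro suf
  induction suf with
  | nil =>
    intro pre heq
    simp only [List.foldl_nil]
    rw [heq, List.append_nil]
  | cons p suf' ih =>
    intro pre heq
    simp only [List.foldl_cons]
    rw [kept_any_eq sets hN o ho hpair pre p suf' heq]
    have hsplit : (pre ++ [p]).filter (fun q => !(Pg sets q.2))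
        = pre.filter (fun q => !(Pg sets q.2)) ++ [p].filter (fun q => !(Pg sets q.2)) :=
      List.filter_append _ _
    cases hPg : Pg sets p.2 with
    | false =>
      have := ih (pre ++ [p]) (by rw [heq, List.append_assoc]; rfl)
      rw [← this]
      congr 1
      · simp [hsplit, hPg]
    | true =>
      have := ih (pre ++ [p]) (by rw [heq, List.append_assoc]; rfl)
      rw [← this]
      congr 1
      · simp [hsplit, hPg]

-- the common core: both reshaped programs are the same filter of `rem`
lemma core (rem : List (List Int)) :
    (((rem.zip (rem.map (fun d => (PySem.Set.ofList d : PySem.Set Int)))).filter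
        (fun p => !((rem.map (fun d => (PySem.Set.ofList d : PySem.Set Int))).any
            (fun other => pyProperSubset p.2 other)))).map Prod.fst)
    =
    ((PySem.List.enumerate rem).filter
        (fun p =>
          ((PySem.List.sorted (PySem.List.enumerate (rem.map (fun d => (PySem.Set.ofList d : PySem.Set Int)))) (fun p => -(PySem.Set.len p.2))).foldl
              (fun (st : List (PySem.Set Int) × List Int) p =>
                if !(st.1.any (fun t => pyProperSubset p.2 t)) then (st.1 ++ [p.2], st.2 ++ [p.1])
                else st)
              ([], [])).2.contains p.1)).map Prod.snd := by
  classical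
  set sets := rem.map (fun d => (PySem.Set.ofList d : PySem.Set Int)) with hsets
  -- A side
  have hzip : rem.zip sets = rem.map (fun d => (d, (PySem.Set.ofList d : PySem.Set Int))) := by
    rw [hsets]
    simpa using (List.zip_map' (f := (id : List Int → List Int)) (g := fun d => (PySem.Set.ofList d : PySem.Set Int)) (l := rem))
  rw [hzip, List.filter_map, List.map_map]
  have hA : (Prod.fst ∘ fun d => (d, (PySem.Set.ofList d : PySem.Set Int))) = id := rfl
  rw [hA, List.map_id]
  -- B side
  have hN : ∀ u ∈ sets, u.Nodup := by
    intro u hu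
    obtain ⟨d, -, rfl⟩ := List.mem_map.1 hu
    exact PySem.Set.nodup_ofList d
  set o := PySem.List.sorted (PySem.List.enumerate sets) (fun p => -(PySem.Set.len p.2)) with hodef
  have ho : o.Perm (PySem.List.enumerate sets 0) := PySem.List.sorted_perm _ _ _
  have hpair : o.Pairwise (fun p q => q.2.length ≤ p.2.length) := by
    refine (PySem.List.sorted_pairwise (PySem.List.enumerate sets) (fun p => -(PySem.Set.len p.2))).imp ?_
    intro a b h
    simp only [PySem.Set.len, neg_le_neg_iff, Nat.cast_le] at h
    exact h
  have hfold := sweep sets hN o ho hpair o [] rfl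
  simp only [List.filter_nil, List.map_nil] at hfold
  rw [hfold]
  have hcontains : ∀ p ∈ PySem.List.enumerate rem 0,
      (((o.filter (fun q => !(Pg sets q.2))).map Prod.fst).contains p.1)
        = (!(Pg sets (PySem.Set.ofList p.2))) := by
    intro p hp
    have hpsets : (p.1, (PySem.Set.ofList p.2 : PySem.Set Int)) ∈ PySem.List.enumerate sets 0 := by
      rw [hsets, enum_map]
      exact List.mem_map.2 ⟨p, hp, rfl⟩
    apply Bool.eq_iff_iff.2
    rw [List.contains_iff_mem]
    constructor
    · intro hm
      obtain ⟨q, hqf, hq1⟩ := List.mem_map.1 hm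
      have hq := List.mem_filter.1 hqf
      have hqe : q ∈ PySem.List.enumerate sets 0 := ho.mem_iff.1 hq.1
      have : q.2 = PySem.Set.ofList p.2 := by
        have hq' : (p.1, q.2) ∈ PySem.List.enumerate sets 0 := by
          rw [← hq1]; simpa using hqe
        exact enum_inj sets 0 hq' hpsets
      rw [← this]
      exact hq.2
    · intro hPg
      refine List.mem_map.2 ⟨(p.1, (PySem.Set.ofList p.2 : PySem.Set Int)), ?_, rfl⟩
      exact List.mem_filter.2 ⟨ho.mem_iff.2 hpsets, hPg⟩
  rw [List.filter_congr hcontains]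
  rw [enum_filter_snd (fun d => !(Pg sets (PySem.Set.ofList d))) rem 0]
  rfl

theorem get_remaining_eq (prime_decomposition_list : List (List Int)) (sols : List Int) :
    get_remaining prime_decomposition_list sols = get_remaining_alt prime_decomposition_list sols := by
  simp only [get_remaining, get_remaining_alt]
  rw [List.filter_congr (fun d _ => pred_eq sols d)]
  exact core _

-- ===== VERDICT (by name: the statement is the Claim_ definition above) =====
theorem get_remaining_spec : Claim_equal_get_remaining := by
  intro pdl sols _
  exact get_remaining_eq pdl sols
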